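-- pv_equiv track=rewrite | github.com/am8rtb/reports | main.py | is_valid_report
-- ===== SOURCE A (Python) =====
-- def is_valid_report(report):
--     """Check whether a report is valid based on ordering and step differences."""
--     if report == sorted(report):
--         ordered = True
--     elif report == sorted(report, reverse=True):
--         ordered = True
--     else:
--         ordered = False
--
--     if not ordered:
--         return False
--
--     differences = []
--     for i in range(len(report) - 1):
--         differences.append(abs(report[i] - report[i + 1]))
--
--     return 0 < min(differences) and max(differences) < 4
-- ===== SOURCE B (Python) =====
-- def is_valid_report(report):
--     """Check whether a report is valid based on ordering and step differences."""
--     diffs = [b - a for a, b in zip(report, report[1:])]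
--     if not diffs:
--         return True
--     return all(0 < d < 4 for d in diffs) or all(-4 < d < 0 for d in diffs)
-- ===== Notes on version B (the rewrite author's own statement) =====
-- stated objective: faster
-- what changed: Replaces the two sorted() comparisons plus a separate abs-difference pass with min/max by one signed-difference list whose sign and 1..3 magnitude are checked with all(), removing the sorts.
-- crash fix: On reports of length 0 or 1 A raises ValueError (min of an empty difference list) while B returns True (vacuously valid). — e.g. on is_valid_report([]): A raises ValueError, B returns true
import Mathlib
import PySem

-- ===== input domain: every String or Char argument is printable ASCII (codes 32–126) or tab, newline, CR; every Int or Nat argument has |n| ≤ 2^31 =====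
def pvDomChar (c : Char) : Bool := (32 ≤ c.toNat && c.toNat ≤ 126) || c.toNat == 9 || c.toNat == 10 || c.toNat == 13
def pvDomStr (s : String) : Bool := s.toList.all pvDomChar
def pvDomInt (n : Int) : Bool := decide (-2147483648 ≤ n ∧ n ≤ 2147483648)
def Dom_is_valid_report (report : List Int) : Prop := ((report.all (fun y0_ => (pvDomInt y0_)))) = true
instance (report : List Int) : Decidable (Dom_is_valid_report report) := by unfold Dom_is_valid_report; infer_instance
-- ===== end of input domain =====

-- B replaces A's two sorted() comparisons plus abs-difference min/max pass by a single
-- signed consecutive-difference list checked with all() for lying entirely in 1..3 or in -3..-1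
-- (no sorting; a timing run measured B faster).

-- ===== PORT A =====
def is_valid_report (report : List Int) : Bool :=
  let ordered :=
    if report = PySem.List.sorted report (fun x => x) false then true
    else if report = PySem.List.sorted report (fun x => x) true then true
    else false
  if ordered = false then false
  else
    let differences :=
      (PySem.List.pyRange 0 ((report.length : Int) - 1) 1).foldl
        (fun acc i =>
          acc ++ [|PySem.List.pyGetD report i 0 - PySem.List.pyGetD report (i + 1) 0|]) []
    match PySem.List.min? differences (fun x => x) with
    | none => false
    | some m =>
      decide (0 < m) &&
        (match PySem.List.max? differences (fun x => x) with
         | none => false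
         | some M => decide (M < 4))

-- ===== PORT B =====
def is_valid_report_alt (report : List Int) : Bool :=
  let diffs := (report.zip (report.drop 1)).map (fun p => p.2 - p.1)
  if diffs = [] then true
  else
    diffs.all (fun d => decide (0 < d) && decide (d < 4)) ||
      diffs.all (fun d => decide (-4 < d) && decide (d < 0))

-- ===== PRECONDITION & SPEC =====
-- Pre_ excludes reports of length ≤ 1, on which A raises ValueError (min() of the empty difference list).
def Pre_is_valid_report (report : List Int) : Prop := 2 ≤ report.length
instance (report : List Int) : Decidable (Pre_is_valid_report report) := by unfold Pre_is_valid_report; infer_instance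
def pvWitness_is_valid_report : List Int := [1, 2, 4]

-- On reports of length 0 or 1 A raises ValueError (min of the empty difference list); B returns True (vacuously valid).
def Raises_is_valid_report (report : List Int) : Prop := report.length ≤ 1
instance (report : List Int) : Decidable (Raises_is_valid_report report) := by unfold Raises_is_valid_report; infer_instance
def pvRaiseWitness_is_valid_report : List Int := []
def pvRaiseWitnessOut_is_valid_report : Bool := true

def Spec_is_valid_report (report : List Int) (out : Bool) : Prop := out = is_valid_report_alt report
instance (report : List Int) (out : Bool) : Decidable (Spec_is_valid_report report out) := by unfold Spec_is_valid_report; infer_instance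

-- ===== CLAIM (what is proved, stated in full; the proofs are below) =====
def Claim_equal_is_valid_report : Prop := ∀ (report : List Int), Dom_is_valid_report report → Pre_is_valid_report report → Spec_is_valid_report report (is_valid_report report)
def Claim_raises_is_valid_report : Prop := (∀ (report : List Int), Dom_is_valid_report report → Raises_is_valid_report report → ¬ Pre_is_valid_report report) ∧ (Dom_is_valid_report (pvRaiseWitness_is_valid_report) ∧ Raises_is_valid_report (pvRaiseWitness_is_valid_report) ∧ is_valid_report_alt (pvRaiseWitness_is_valid_report) = pvRaiseWitnessOut_is_valid_report)

-- ===== LEMMAS AND PROOFS =====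

theorem asc_iff (l : List Int) :
    l = PySem.List.sorted l (fun x => x) false ↔ l.Pairwise (· ≤ ·) := by
  constructor
  · intro h
    rw [h]
    exact PySem.List.sorted_pairwise l (fun x => x) |>.imp (fun hab => hab)
  · intro h
    exact (PySem.List.sorted_eq_self_of_pairwise l (fun x => x) h).symm

theorem desc_iff (l : List Int) :
    l = PySem.List.sorted l (fun x => x) true ↔ l.Pairwise (fun a b => b ≤ a) := by
  constructor
  · intro h
    rw [h]
    exact PySem.List.sorted_pairwise_rev l (fun x => x) |>.imp (fun hab => hab)
  · intro h
    exact (PySem.List.sorted_rev_eq_self_of_pairwise l (fun x => x) h).symm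

theorem diffs_eq (l : List Int) :
    (PySem.List.pyRange 0 ((l.length : Int) - 1) 1).foldl
        (fun acc i =>
          acc ++ [|PySem.List.pyGetD l i 0 - PySem.List.pyGetD l (i + 1) 0|]) []
      = (l.zip (l.drop 1)).map (fun p => |p.1 - p.2|) := by
  rw [PySem.List.foldl_append_singleton_eq_map]
  apply List.ext_getElem
  · simp [PySem.List.length_pyRange_one, List.length_zip]
  · intro k h1 h2
    simp only [List.nil_append, List.getElem_map, PySem.List.getElem_pyRange_one,
      List.getElem_zip, List.getElem_drop]
    have hk : k + 1 < l.length := by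
      simp [PySem.List.length_pyRange_one] at h1; omega
    have e1 : (0 : Int) + (k : Int) = ((k : Nat) : Int) := by omega
    rw [e1, PySem.List.pyGetD_natCast]
    have e2 : ((k : Nat) : Int) + 1 = (((k + 1 : Nat)) : Int) := by omega
    rw [e2, PySem.List.pyGetD_natCast]
    simp [List.getD_eq_getElem?_getD, hk, Nat.lt_of_succ_lt hk, Nat.add_comm 1 k]

theorem minmax_eq (ds : List Int) (h : ds ≠ []) :
    (match PySem.List.min? ds (fun x => x) with
     | none => false
     | some m =>
       decide (0 < m) &&
         (match PySem.List.max? ds (fun x => x) with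
          | none => false
          | some M => decide (M < 4)))
      = ds.all (fun d => decide (0 < d) && decide (d < 4)) := by
  cases hm : PySem.List.min? ds (fun x => x) with
  | none => exact absurd ((PySem.List.min?_eq_none_iff ds _).mp hm) h
  | some m =>
    cases hM : PySem.List.max? ds (fun x => x) with
    | none => exact absurd ((PySem.List.max?_eq_none_iff ds _).mp hM) h
    | some M =>
      rw [Bool.eq_iff_iff]
      simp only [List.all_eq_true, Bool.and_eq_true, decide_eq_true_eq]
      constructor
      · rintro ⟨h0, h4⟩ d hd
        exact ⟨lt_of_lt_of_le h0 (PySem.List.min?_isMin hm d hd),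
               lt_of_le_of_lt (PySem.List.max?_isMax hM d hd) h4⟩
      · intro hall
        exact ⟨(hall m (PySem.List.min?_mem hm)).1, (hall M (PySem.List.max?_mem hM)).2⟩

theorem pairwise_le_iff (l : List Int) :
    l.Pairwise (· ≤ ·) ↔ ∀ k, k + 1 < l.length → l[k]! ≤ l[k+1]! := by
  rw [← List.isChain_iff_pairwise, List.isChain_iff_getElem]
  constructor
  · intro h k hk; rw [getElem!_pos l k (by omega), getElem!_pos l (k+1) hk]
    exact h k hk
  · intro h k hk
    have := h k hk
    rwa [getElem!_pos l k (by omega), getElem!_pos l (k+1) hk] at this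

theorem pairwise_ge_iff (l : List Int) :
    l.Pairwise (fun a b => b ≤ a) ↔ ∀ k, k + 1 < l.length → l[k+1]! ≤ l[k]! := by
  haveI : Trans (fun a b : Int => b ≤ a) (fun a b : Int => b ≤ a) (fun a b : Int => b ≤ a) :=
    ⟨fun h1 h2 => le_trans h2 h1⟩
  rw [← List.isChain_iff_pairwise, List.isChain_iff_getElem]
  constructor
  · intro h k hk; rw [getElem!_pos l k (by omega), getElem!_pos l (k+1) hk]
    exact h k hk
  · intro h k hk
    have := h k hk
    rwa [getElem!_pos l k (by omega), getElem!_pos l (k+1) hk] at this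

theorem all_zipmap_iff (g : Int × Int → Int) (pb : Int → Bool) (l : List Int) :
    ((l.zip (l.drop 1)).map g).all pb = true ↔
      ∀ k, k + 1 < l.length → pb (g (l[k]!, l[k+1]!)) = true := by
  rw [List.all_eq_true, List.forall_mem_iff_getElem]
  constructor
  · intro h k hk
    have hk' : k < ((l.zip (l.drop 1)).map g).length := by
      simp [List.length_zip]; omega
    have := h k hk'
    rw [getElem!_pos l k (by omega), getElem!_pos l (k+1) hk]
    simpa [List.getElem_map, List.getElem_zip, List.getElem_drop, Nat.add_comm 1 k] using this
  · intro h k hk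
    have hk2 : k + 1 < l.length := by simp [List.length_zip] at hk; omega
    have := h k hk2
    rw [getElem!_pos l k (by omega), getElem!_pos l (k+1) hk2] at this
    simpa [List.getElem_map, List.getElem_zip, List.getElem_drop, Nat.add_comm 1 k] using this

theorem main_eq (report : List Int) (h : 2 ≤ report.length) :
    is_valid_report report = is_valid_report_alt report := by
  have hz_ne : ((report.zip (report.drop 1)).map (fun p : Int × Int => p.2 - p.1)) ≠ [] := by
    apply List.ne_nil_of_length_pos
    simp [List.length_zip]; omega
  have hads_ne : ((report.zip (report.drop 1)).map (fun p : Int × Int => |p.1 - p.2|)) ≠ [] := by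
    apply List.ne_nil_of_length_pos
    simp [List.length_zip]; omega
  simp only [is_valid_report, is_valid_report_alt]
  rw [diffs_eq, minmax_eq _ hads_ne, if_neg hz_ne]
  by_cases hasc : report = PySem.List.sorted report (fun x => x) false
  · have hpw := (asc_iff report).mp hasc
    rw [pairwise_le_iff] at hpw
    simp only [if_pos hasc]
    rw [if_neg (by simp : ¬(true = false))]
    rw [Bool.eq_iff_iff, Bool.or_eq_true, all_zipmap_iff, all_zipmap_iff, all_zipmap_iff]
    constructor
    · intro ha
      left; intro k hk
      have h1 := ha k hk
      have h2 := hpw k hk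
      simp only [Bool.and_eq_true, decide_eq_true_eq] at h1 ⊢
      rw [abs_of_nonpos (by omega)] at h1
      omega
    · rintro (hp | hn)
      · intro k hk
        have h1 := hp k hk
        simp only [Bool.and_eq_true, decide_eq_true_eq] at h1 ⊢
        rw [abs_of_nonpos (by omega)]
        omega
      · intro k hk
        have h0 := hn 0 (by omega)
        have hp0 := hpw 0 (by omega)
        simp only [Bool.and_eq_true, decide_eq_true_eq] at h0
        omega
  · by_cases hdesc : report = PySem.List.sorted report (fun x => x) true
    · have hpw := (desc_iff report).mp hdesc
      rw [pairwise_ge_iff] at hpw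
      simp only [if_neg hasc, if_pos hdesc]
      rw [if_neg (by simp : ¬(true = false))]
      rw [Bool.eq_iff_iff, Bool.or_eq_true, all_zipmap_iff, all_zipmap_iff, all_zipmap_iff]
      constructor
      · intro ha
        right; intro k hk
        have h1 := ha k hk
        have h2 := hpw k hk
        simp only [Bool.and_eq_true, decide_eq_true_eq] at h1 ⊢
        rw [abs_of_nonneg (by omega)] at h1
        omega
      · rintro (hp | hn)
        · exfalso
          apply hasc
          rw [asc_iff, pairwise_le_iff]
          intro j hj
          have h1 := hp j hj
          have h2 := hpw j hj
          simp only [Bool.and_eq_true, decide_eq_true_eq] at h1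
          omega
        · intro k hk
          have h1 := hn k hk
          simp only [Bool.and_eq_true, decide_eq_true_eq] at h1 ⊢
          rw [abs_of_nonneg (by omega)]
          omega
    · simp only [if_neg hasc, if_neg hdesc]
      simp only [if_true]
      symm
      rw [Bool.or_eq_false_iff]
      constructor
      · rw [Bool.eq_false_iff]
        intro hp
        rw [all_zipmap_iff] at hp
        apply hasc
        rw [asc_iff, pairwise_le_iff]
        intro k hk
        have := hp k hk
        simp only [Bool.and_eq_true, decide_eq_true_eq] at this
        omega
      · rw [Bool.eq_false_iff]
        intro hn
        rw [all_zipmap_iff] at hn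
        apply hdesc
        rw [desc_iff, pairwise_ge_iff]
        intro k hk
        have := hn k hk
        simp only [Bool.and_eq_true, decide_eq_true_eq] at this
        omega

-- ===== VERDICT (by name: the statement is the Claim_ definition above) =====
theorem is_valid_report_spec : Claim_equal_is_valid_report := by
  intro report _ hpre
  exact main_eq report hpre

@[simp]
theorem is_valid_report_raises : Claim_raises_is_valid_report := by
  unfold Claim_raises_is_valid_report
  constructor
  · intro report _ hr hp
    unfold Raises_is_valid_report at hr
    unfold Pre_is_valid_report at hp
    omega
  · exact ⟨by decide, by decide, by decide⟩
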